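-- pv_equiv track=rewrite | github.com/IanFinlayson/advent-of-code-2024 | 12/part2.py | topEdges
-- ===== SOURCE A (Python) =====
-- def r(regions, row, col):
--     if row < 0 or row >= len(regions) or col < 0 or col >= len(regions[0]):
--         return -1
--     return regions[row][col]
--
-- def topEdges(regions, id):
--     # we scan through looking for the places where edges start, and then when they end
--     # when they end we increment a counter
--     onEdge = False
--     edges = 0
--     for row in range(0, len(regions)):
--         for col in range(len(regions[0])):
--             # if this one is different to one above it, we have the start of a top edge
--             if regions[row][col] == id and not onEdge and r(regions, row - 1, col) != id:
--                 onEdge = True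
--
--             # if we're still on the edge, keep going
--             elif onEdge and regions[row][col] == id and r(regions, row - 1, col) != id:
--                 pass
--
--             # if we finish an edge
--             elif onEdge and (regions[row][col] != id or r(regions, row - 1, col) == id):
--                 onEdge = False
--                 edges += 1
--
--         # if still on edge, finish it
--         if onEdge:
--             onEdge = False
--             edges += 1
--     return edges
-- ===== SOURCE B (Python) =====
-- def topEdges(regions, id):
--     # inclusion-exclusion: number of runs = (# top-edge cells) - (# adjacent top-edge pairs),
--     # computed per row from a mask against the previous row (a virtual -1 border row above row 0)
--     if not regions:
--         return 0
--     w = len(regions[0])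
--     total = 0
--     prev = [-1] * w
--     for row in regions:
--         mask = [row[c] == id and prev[c] != id for c in range(w)]
--         total += sum(mask) - sum(1 for a, b in zip(mask, mask[1:]) if a and b)
--         prev = row
--     return total
-- ===== Notes on version B (the rewrite author's own statement) =====
-- stated objective: alternative
-- what changed: A counts runs by scanning with an onEdge state flag and incrementing where runs end (plus an end-of-row flush); B uses the counting identity runs = cells - adjacent pairs: per row it builds a top-edge mask against the previous row (virtual -1 border row) and adds sum(mask) minus the number of adjacent True pairs, with no scan state at all.
import Mathlib
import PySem

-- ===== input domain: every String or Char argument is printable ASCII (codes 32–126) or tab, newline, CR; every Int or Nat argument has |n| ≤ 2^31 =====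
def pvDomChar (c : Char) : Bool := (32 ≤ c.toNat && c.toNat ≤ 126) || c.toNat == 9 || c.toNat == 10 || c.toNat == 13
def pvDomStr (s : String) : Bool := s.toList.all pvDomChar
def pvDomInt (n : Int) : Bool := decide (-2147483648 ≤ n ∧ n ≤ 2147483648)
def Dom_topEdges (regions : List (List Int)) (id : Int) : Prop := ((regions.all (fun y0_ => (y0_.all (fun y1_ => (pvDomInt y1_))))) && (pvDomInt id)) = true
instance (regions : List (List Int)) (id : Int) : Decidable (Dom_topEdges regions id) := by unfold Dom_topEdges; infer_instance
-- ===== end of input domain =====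

-- B replaces A's stateful scan (onEdge flag counting where runs end, end-of-row flush) by the
-- counting identity runs = cells - adjacent pairs, applied per row to a top-edge mask: alternative.

-- ===== PORT A =====
-- helper r(regions, row, col)
def pyR (regions : List (List Int)) (row col : Int) : Int :=
  if row < 0 || row ≥ PySem.List.len regions || col < 0
     || col ≥ PySem.List.len (PySem.List.pyGetD regions 0 []) then -1
  else PySem.List.pyGetD (PySem.List.pyGetD regions row []) col 0

def topEdges (regions : List (List Int)) (id : Int) : Int :=
  ((PySem.List.pyRange 0 (PySem.List.len regions) 1).foldl (fun st row =>
      let st2 := (PySem.List.pyRange 0 (PySem.List.len (PySem.List.pyGetD regions 0 [])) 1).foldl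
        (fun (st : Bool × Int) col =>
          if PySem.List.pyGetD (PySem.List.pyGetD regions row []) col 0 == id && !st.1
               && pyR regions (row - 1) col != id then (true, st.2)
          else if st.1 && PySem.List.pyGetD (PySem.List.pyGetD regions row []) col 0 == id
               && pyR regions (row - 1) col != id then st
          else if st.1 && (PySem.List.pyGetD (PySem.List.pyGetD regions row []) col 0 != id
               || pyR regions (row - 1) col == id) then (false, st.2 + 1)
          else st) st
      if st2.1 then (false, st2.2 + 1) else st2) ((false : Bool), (0 : Int))).2

-- ===== PORT B =====
def topEdges_alt (regions : List (List Int)) (id : Int) : Int :=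
  if regions = [] then 0
  else
    let w := PySem.List.len (regions.headD [])
    (regions.foldl (fun (st : List Int × Int) row =>
        let mask := (PySem.List.pyRange 0 w 1).map (fun c =>
          PySem.List.pyGetD row c 0 == id && PySem.List.pyGetD st.1 c 0 != id)
        (row, st.2 + ((mask.countP (fun b => b) : Nat) : Int)
          - (((mask.zip mask.tail).countP (fun p => p.1 && p.2) : Nat) : Int)))
      (List.replicate (regions.headD []).length (-1), (0 : Int))).2

-- ===== PRECONDITION & SPEC =====
-- A indexes every row up to len(regions[0]); a row shorter than row 0 makes A (and B) raise IndexError.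
def Pre_topEdges (regions : List (List Int)) (id : Int) : Prop :=
  ∀ r ∈ regions, (regions.headD []).length ≤ r.length
instance (regions : List (List Int)) (id : Int) : Decidable (Pre_topEdges regions id) := by
  unfold Pre_topEdges; infer_instance
def pvWitness_topEdges : List (List Int) × Int := ([[1, 1, 0], [0, 1, 1]], 1)

def Spec_topEdges (regions : List (List Int)) (id : Int) (out : Int) : Prop := out = topEdges_alt regions id
instance (regions : List (List Int)) (id : Int) (out : Int) : Decidable (Spec_topEdges regions id out) := by unfold Spec_topEdges; infer_instance

-- ===== CLAIM (what is proved, stated in full; the proofs are below) =====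
def Claim_equal_topEdges : Prop := ∀ (regions : List (List Int)) (id : Int), Dom_topEdges regions id → Pre_topEdges regions id → Spec_topEdges regions id (topEdges regions id)

-- ===== LEMMAS AND PROOFS =====

-- cell (row,col) is a top-edge cell of region `id` (proof-side characterisation of both programs)
def topCell (regions : List (List Int)) (id row col : Int) : Bool :=
  let above := if row > 0 then PySem.List.pyGetD (PySem.List.pyGetD regions (row - 1) []) col 0 else -1
  PySem.List.pyGetD (PySem.List.pyGetD regions row []) col 0 == id && above != id

def maskA (regions : List (List Int)) (id row : Int) : List Bool :=
  (PySem.List.pyRange 0 (PySem.List.len (regions.headD [])) 1).map (topCell regions id row)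

-- abstract single-row machinery for A
def stepRow (st : Bool × Int) (b : Bool) : Bool × Int :=
  if b then (true, st.2) else if st.1 then (false, st.2 + 1) else st

def flushRow (st : Bool × Int) : Bool × Int :=
  if st.1 then (false, st.2 + 1) else st

def starts : Bool → List Bool → Int
  | _, [] => 0
  | prev, b :: bs => (if b && !prev then 1 else 0) + starts b bs

-- adjacent true-true pairs with a carried previous bit
def adjP : Bool → List Bool → Int
  | _, [] => 0
  | prev, b :: bs => (if prev && b then 1 else 0) + adjP b bs

theorem flush_foldl_stepRow (bs : List Bool) (ob : Bool) (c : Int) :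
    flushRow (bs.foldl stepRow (ob, c))
      = (false, c + (if ob then 1 else 0) + starts ob bs) := by
  induction bs generalizing ob c with
  | nil => cases ob <;> simp [flushRow, starts]
  | cons b bs ih =>
    cases b <;> cases ob <;>
      simp [List.foldl_cons, stepRow, starts, ih] <;> ring

-- runs = cells − adjacent pairs
theorem starts_eq_count_sub (bs : List Bool) :
    ∀ prev, starts prev bs = ((bs.countP (fun b => b) : Nat) : Int) - adjP prev bs := by
  induction bs with
  | nil => intro prev; simp [starts, adjP]
  | cons b bs ih =>
    intro prev
    cases b <;> cases prev <;>
      simp [starts, adjP, List.countP_cons, ih] <;> push_cast <;> ring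

theorem zip_tail_countP (bs : List Bool) :
    (((bs.zip bs.tail).countP (fun p => p.1 && p.2) : Nat) : Int) = adjP false bs := by
  cases bs with
  | nil => simp [adjP]
  | cons a rest =>
    show (((( a :: rest).zip rest).countP (fun p => p.1 && p.2) : Nat) : Int) = adjP false (a :: rest)
    have : ∀ (rest : List Bool) (a : Bool),
        ((((a :: rest).zip rest).countP (fun p => p.1 && p.2) : Nat) : Int) = adjP a rest := by
      intro rest
      induction rest with
      | nil => intro a; simp [adjP]
      | cons c r ih =>
        intro a
        simp only [List.zip_cons_cons, List.countP_cons, adjP]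
        rw [← ih c]
        push_cast
        cases a <;> cases c <;> simp <;> ring
    rw [this rest a]
    simp [adjP]

-- the generic outer fold: each row step returns (false, previous count + this row's count)
theorem foldl_rows (h : Int → Int) :
    ∀ (L : List Int) (g : Bool × Int → Int → Bool × Int) (c : Int),
      (∀ c' row, row ∈ L → g (false, c') row = (false, c' + h row)) →
      L.foldl g (false, c) = (false, c + (L.map h).sum) := by
  intro L
  induction L with
  | nil => intro g c _; simp
  | cons x L ih =>
    intro g c hg
    rw [List.foldl_cons, hg c x (List.mem_cons_self), ih g (c + h x)
        (fun c' row hr => hg c' row (List.mem_cons_of_mem _ hr))]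
    simp [add_assoc]

-- A's inner body equals stepRow driven by topCell, for in-grid indices
theorem bodyA_eq_stepRow (regions : List (List Int)) (id : Int) (row col : Int)
    (hrow : 0 ≤ row ∧ row < PySem.List.len regions)
    (hcol : 0 ≤ col ∧ col < PySem.List.len (PySem.List.pyGetD regions 0 [])) (st : Bool × Int) :
    (if PySem.List.pyGetD (PySem.List.pyGetD regions row []) col 0 == id && !st.1
          && pyR regions (row - 1) col != id then (true, st.2)
     else if st.1 && PySem.List.pyGetD (PySem.List.pyGetD regions row []) col 0 == id
          && pyR regions (row - 1) col != id then st
     else if st.1 && (PySem.List.pyGetD (PySem.List.pyGetD regions row []) col 0 != id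
          || pyR regions (row - 1) col == id) then (false, st.2 + 1)
     else st) = stepRow st (topCell regions id row col) := by
  have hr : pyR regions (row - 1) col
      = (if row > 0 then PySem.List.pyGetD (PySem.List.pyGetD regions (row - 1) []) col 0 else -1) := by
    unfold pyR
    by_cases h : row > 0
    · simp only [PySem.List.len_eq] at hrow hcol
      simp [pyR, h]
      intro hx
      exact absurd hx (by omega)
    · have h0 : row = 0 := by omega
      simp [h0]
  unfold topCell
  rw [hr]
  set cell := PySem.List.pyGetD (PySem.List.pyGetD regions row []) col 0
  set ab := (if row > 0 then PySem.List.pyGetD (PySem.List.pyGetD regions (row - 1) []) col 0 else -1)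
  unfold stepRow
  by_cases hc : cell = id <;> by_cases hab : ab = id <;> cases hst : st.1 <;>
    simp [hc, hab, hst, bne, Prod.ext_iff]

-- A's value: sum over rows of starts false (maskA row)
theorem topEdges_eq_sum (regions : List (List Int)) (id : Int) (hnil : regions ≠ []) :
    topEdges regions id
      = ((PySem.List.pyRange 0 (PySem.List.len regions) 1).map
          (fun row => starts false (maskA regions id row))).sum := by
  unfold topEdges
  have hw0 : PySem.List.pyGetD regions 0 [] = regions.headD [] := by
    cases regions with
    | nil => simp at hnil
    | cons r rs => simp [PySem.List.pyGetD_zero_cons]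
  rw [foldl_rows (fun row => starts false (maskA regions id row))]
  · simp
  · intro c' row hrow
    have hrow' : 0 ≤ row ∧ row < PySem.List.len regions := by
      have := (PySem.List.mem_pyRange_one).1 hrow; exact ⟨this.1, this.2⟩
    have hinner :
        (PySem.List.pyRange 0 (PySem.List.len (PySem.List.pyGetD regions 0 [])) 1).foldl
          (fun (st : Bool × Int) col =>
            if PySem.List.pyGetD (PySem.List.pyGetD regions row []) col 0 == id && !st.1
                 && pyR regions (row - 1) col != id then (true, st.2)
            else if st.1 && PySem.List.pyGetD (PySem.List.pyGetD regions row []) col 0 == id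
                 && pyR regions (row - 1) col != id then st
            else if st.1 && (PySem.List.pyGetD (PySem.List.pyGetD regions row []) col 0 != id
                 || pyR regions (row - 1) col == id) then (false, st.2 + 1)
            else st) ((false : Bool), c')
        = (maskA regions id row).foldl stepRow (false, c') := by
      unfold maskA
      rw [hw0, List.foldl_map]
      apply PySem.List.foldl_congr_mem
      intro acc col hcol
      have hcol' := (PySem.List.mem_pyRange_one).1 hcol
      exact bodyA_eq_stepRow regions id row col hrow' ⟨hcol'.1, by rw [hw0]; exact hcol'.2⟩ acc
    simp only [hinner]
    have hfl := flush_foldl_stepRow (maskA regions id row) false c'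
    simp only [flushRow, if_false, Bool.false_eq_true] at hfl
    simpa using hfl

-- B's fold over a suffix, with the previous row (or the virtual -1 row) carried
theorem foldB_suffix (regions : List (List Int)) (id : Int) :
    ∀ (suf : List (List Int)) (i : Nat) (prev : List Int) (c : Int),
      regions.drop i = suf →
      (∀ col : Int, 0 ≤ col → col < PySem.List.len (regions.headD []) →
        PySem.List.pyGetD prev col 0
          = (if (i : Int) > 0 then PySem.List.pyGetD (PySem.List.pyGetD regions ((i : Int) - 1) []) col 0
             else -1)) →
      (suf.foldl (fun (st : List Int × Int) row =>
          let mask := (PySem.List.pyRange 0 (PySem.List.len (regions.headD [])) 1).map (fun cc =>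
            PySem.List.pyGetD row cc 0 == id && PySem.List.pyGetD st.1 cc 0 != id)
          (row, st.2 + ((mask.countP (fun b => b) : Nat) : Int)
            - (((mask.zip mask.tail).countP (fun p => p.1 && p.2) : Nat) : Int)))
        (prev, c)).2
      = c + ((PySem.List.pyRange (i : Int) (PySem.List.len regions) 1).map
          (fun row =>
            (((maskA regions id row).countP (fun b => b) : Nat) : Int)
              - ((((maskA regions id row).zip (maskA regions id row).tail).countP
                  (fun p => p.1 && p.2) : Nat) : Int))).sum := by
  intro suf
  induction suf with
  | nil =>
    intro i prev c hdrop _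
    have hlen : regions.length ≤ i := by
      have := congrArg List.length hdrop; simp at this; omega
    have hnilr : PySem.List.pyRange (i : Int) (PySem.List.len regions) 1 = [] :=
      PySem.List.pyRange_one_eq_nil (by rw [PySem.List.len_eq]; exact_mod_cast hlen)
    rw [hnilr]
    simp
  | cons r rest ih =>
    intro i prev c hdrop hprev
    have hi : i < regions.length := by
      by_contra h
      rw [List.drop_eq_nil_of_le (by omega)] at hdrop
      exact List.cons_ne_nil r rest hdrop.symm
    have hri : regions[i]? = some r := by
      have := congrArg (fun l => l[0]?) hdrop
      simpa [List.getElem?_drop] using this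
    have hgi : PySem.List.pyGetD regions (i : Int) [] = r := by
      rw [PySem.List.pyGetD_natCast]
      simpa [List.getD, List.getElem?_eq_getElem hi] using congrArg (fun o => o.getD ([] : List Int)) hri
    have hdrop' : regions.drop (i + 1) = rest := by
      have h := congrArg List.tail hdrop
      rw [List.tail_drop] at h
      simpa using h
    -- the mask built by this step equals maskA at row i
    have hmask :
        ((PySem.List.pyRange 0 (PySem.List.len (regions.headD [])) 1).map (fun cc =>
            PySem.List.pyGetD r cc 0 == id && PySem.List.pyGetD prev cc 0 != id))
          = maskA regions id (i : Int) := by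
      unfold maskA
      apply List.map_congr_left
      intro cc hcc
      have hcc' := (PySem.List.mem_pyRange_one).1 hcc
      unfold topCell
      rw [hgi.symm] at *
      rw [hprev cc hcc'.1 hcc'.2]
    rw [List.foldl_cons]
    simp only
    rw [hmask]
    rw [ih (i + 1) r _ hdrop' ?_]
    · have hlt : (i : Int) < PySem.List.len regions := by
        simp [PySem.List.len_eq]; exact_mod_cast hi
      rw [PySem.List.pyRange_one_cons hlt]
      push_cast
      simp [List.map_cons]
      ring
    · intro col h0 hw
      have : ((i : Int) + 1) - 1 = (i : Int) := by ring
      simp only [Nat.cast_add, Nat.cast_one, this]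
      rw [if_pos (by omega), hgi]

-- ===== VERDICT (by name: the statement is the Claim_ definition above) =====
theorem topEdges_spec : Claim_equal_topEdges := by
  intro regions id _ _
  unfold Spec_topEdges topEdges_alt
  by_cases hnil : regions = []
  · subst hnil
    simp [topEdges, PySem.List.pyRange_one_eq_nil]
  · rw [if_neg hnil]
    rw [topEdges_eq_sum regions id hnil]
    have hB := foldB_suffix regions id regions 0 (List.replicate (regions.headD []).length (-1)) 0
      (by simp) ?_
    · simp only [Nat.cast_zero] at hB
      rw [hB]
      rw [zero_add]
      apply congrArg
      apply List.map_congr_left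
      intro row _
      rw [starts_eq_count_sub (maskA regions id row) false, zip_tail_countP]
    · intro col h0 hw
      rw [if_neg (by omega)]
      rw [PySem.List.len_eq] at hw
      have hlt : col.toNat < (regions.headD []).length := by omega
      have hcol : col = ((col.toNat : Nat) : Int) := by omega
      rw [hcol, PySem.List.pyGetD_natCast]
      simp only [List.headD_eq_head?] at hlt
      simp [List.getD, List.getElem?_replicate, hlt]
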